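-- pv_equiv track=rewrite | github.com/Fabio951/HangMan | project/print_game.py | _edit_draw
-- ===== SOURCE A (Python) =====
-- def _edit_draw(
--     draw: str, before: str = "", after: str = "", before_line: str = ""
-- ) -> str:
--     """
--     Edit a draw to render it better.
--
--     :param draw: the draw to edit
--     :param before: what to append before the draw
--     :param after: what to append after the draw
--     :param before_line: what to append at the beginning of each
--         line of the draw
--     :return: the edited draw
--     """
--     new_lines = [before]
--     for line in draw.split("\n"):
--         new_lines.append(before_line + line)
--     new_lines.append(after)
--     return "\n".join(new_lines)
-- ===== SOURCE B (Python) =====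
-- def _edit_draw(
--     draw: str, before: str = "", after: str = "", before_line: str = ""
-- ) -> str:
--     """Same result as A, computed without lists or loops: one str.replace."""
--     body = before_line + draw.replace("\n", "\n" + before_line)
--     return before + "\n" + body + "\n" + after
-- ===== Notes on version B (the rewrite author's own statement) =====
-- stated objective: idiomatic
-- what changed: B drops the line list and the prefixing loop entirely: it inserts before_line after every newline with a single str.replace (and once at the front) and concatenates before/after around it.
import Mathlib
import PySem

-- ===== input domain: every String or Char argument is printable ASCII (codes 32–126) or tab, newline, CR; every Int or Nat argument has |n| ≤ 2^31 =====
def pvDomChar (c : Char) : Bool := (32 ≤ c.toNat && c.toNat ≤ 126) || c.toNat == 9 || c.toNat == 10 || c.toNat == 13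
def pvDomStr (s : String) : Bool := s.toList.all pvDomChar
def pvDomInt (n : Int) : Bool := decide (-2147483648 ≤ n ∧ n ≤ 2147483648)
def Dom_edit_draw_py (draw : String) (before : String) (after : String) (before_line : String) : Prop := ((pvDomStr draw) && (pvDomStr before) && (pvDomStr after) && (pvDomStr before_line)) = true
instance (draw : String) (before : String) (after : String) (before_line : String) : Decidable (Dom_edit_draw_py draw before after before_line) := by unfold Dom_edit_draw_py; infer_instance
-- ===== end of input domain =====

-- B replaces A's split/loop/join over a list of lines by a single string replace
-- ("\n" -> "\n" + before_line) with before_line prepended once; objective: idiomatic.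

-- ===== PORT A =====
-- A: new_lines = [before]; for line in draw.split("\n"): new_lines.append(before_line + line);
--    new_lines.append(after); return "\n".join(new_lines)
-- (string concatenation is ported as list append on code points, via String.ofList/toList)
def edit_draw_py (draw : String) (before : String) (after : String) (before_line : String) : String :=
  let lines := PySem.Chars.splitOn draw.toList ['\n']
  let new_lines := lines.foldl
    (fun acc line => acc ++ [String.ofList (before_line.toList ++ line)]) [before]
  let new_lines := new_lines ++ [after]
  PySem.Str.join "\n" new_lines

-- ===== PORT B =====
-- B: body = before_line + draw.replace("\n", "\n" + before_line);
--    return before + "\n" + body + "\n" + after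
def edit_draw_py_alt (draw : String) (before : String) (after : String) (before_line : String) : String :=
  let body := String.ofList (before_line.toList ++
    (PySem.Str.replace draw "\n" (String.ofList ('\n' :: before_line.toList))).toList)
  String.ofList (before.toList ++ '\n' :: (body.toList ++ '\n' :: after.toList))

-- ===== PRECONDITION & SPEC =====
def Spec_edit_draw_py (draw : String) (before : String) (after : String) (before_line : String) (out : String) : Prop := out = edit_draw_py_alt draw before after before_line
instance (draw : String) (before : String) (after : String) (before_line : String) (out : String) : Decidable (Spec_edit_draw_py draw before after before_line out) := by unfold Spec_edit_draw_py; infer_instance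

-- ===== CLAIM (what is proved, stated in full; the proofs are below) =====
def Claim_equal_edit_draw_py : Prop := ∀ (draw : String) (before : String) (after : String) (before_line : String), Dom_edit_draw_py draw before after before_line → Spec_edit_draw_py draw before after before_line (edit_draw_py draw before after before_line)

-- ===== LEMMAS AND PROOFS =====

-- reference recursion for draw.split("\n") with the chars of the current line accumulated in order
def pvSplitNL (cur : List Char) : List Char → List (List Char)
  | [] => [cur]
  | c :: t => if c = '\n' then cur :: pvSplitNL [] t else pvSplitNL (cur ++ [c]) t

-- reference recursion for draw.replace("\n", "\n" + p)
def pvRepNL (p : List Char) : List Char → List Char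
  | [] => []
  | c :: t => if c = '\n' then '\n' :: (p ++ pvRepNL p t) else c :: pvRepNL p t

lemma go_split (s : List Char) : ∀ (fuel : Nat) (cur : List Char) (acc : List (List Char)),
    s.length < fuel →
    PySem.Chars.splitOn.go ['\n'] fuel s cur acc = acc.reverse ++ pvSplitNL cur.reverse s := by
  induction s with
  | nil =>
    intro fuel cur acc h
    match fuel with
    | fuel + 1 => simp [PySem.Chars.splitOn.go, pvSplitNL]
  | cons c t ih =>
    intro fuel cur acc h
    match fuel with
    | fuel + 1 =>
      rw [PySem.Chars.splitOn.go]
      by_cases hc : c = '\n'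
      · subst hc
        simp only [List.isPrefixOf, List.length_cons] at *
        simp only [beq_self_eq_true, Bool.true_and, if_true, List.length_nil,
          List.drop_succ_cons, List.drop_zero]
        rw [ih fuel [] (cur.reverse :: acc) (by simp at h; omega)]
        simp [pvSplitNL]
      · have : (['\n'].isPrefixOf (c :: t)) = false := by
          simp [List.isPrefixOf]; exact fun h' => absurd h'.symm hc
        simp only [this, Bool.false_eq_true, if_false]
        rw [ih fuel (c :: cur) acc (by simp at h; omega)]
        simp [pvSplitNL, hc]

lemma go_rep (p : List Char) (s : List Char) : ∀ (fuel : Nat) (acc : List Char),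
    s.length ≤ fuel →
    PySem.Chars.replace.go ['\n'] ('\n' :: p) fuel s acc = acc.reverse ++ pvRepNL p s := by
  induction s with
  | nil =>
    intro fuel acc h
    match fuel with
    | 0 => simp [PySem.Chars.replace.go, pvRepNL]
    | fuel + 1 => simp [PySem.Chars.replace.go, pvRepNL]
  | cons c t ih =>
    intro fuel acc h
    match fuel with
    | fuel + 1 =>
      rw [PySem.Chars.replace.go]
      by_cases hc : c = '\n'
      · subst hc
        simp only [List.isPrefixOf, beq_self_eq_true, Bool.true_and, if_true,
          List.length_cons, List.length_nil, List.drop_succ_cons, List.drop_zero]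
        rw [ih fuel _ (by simp at h; omega)]
        simp [pvRepNL]
      · have : (['\n'].isPrefixOf (c :: t)) = false := by
          simp [List.isPrefixOf]; exact fun h' => absurd h'.symm hc
        simp only [this, Bool.false_eq_true, if_false]
        rw [ih fuel _ (by simp at h; omega)]
        simp [pvRepNL, hc]

-- joining the prefixed split lines (plus the trailing 'after' part) IS prefix ++ replace
lemma join_split (p a : List Char) (s : List Char) : ∀ (cur : List Char),
    PySem.Chars.join ['\n'] ((pvSplitNL cur s).map (p ++ ·) ++ [a])
      = p ++ cur ++ pvRepNL p s ++ '\n' :: a := by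
  induction s with
  | nil =>
    intro cur
    simp [pvSplitNL, pvRepNL, PySem.Chars.join, List.intercalate, List.intersperse]
  | cons c t ih =>
    intro cur
    by_cases hc : c = '\n'
    · subst hc
      simp only [pvSplitNL, if_true, List.map_cons, List.cons_append]
      rw [show PySem.Chars.join ['\n'] ((p ++ cur) :: ((pvSplitNL [] t).map (p ++ ·) ++ [a]))
            = (p ++ cur) ++ '\n' :: PySem.Chars.join ['\n'] ((pvSplitNL [] t).map (p ++ ·) ++ [a]) from ?_]
      · rw [ih []]
        simp [pvRepNL]
      · rcases h : (pvSplitNL [] t).map (p ++ ·) ++ [a] with _ | ⟨x, xs⟩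
        · exact absurd h (by simp)
        · simp [PySem.Chars.join, List.intercalate, List.intersperse]
    · simp only [pvSplitNL, hc, if_false]
      rw [ih (cur ++ [c])]
      simp [pvRepNL, hc]

theorem edit_draw_eq (draw before after before_line : String) :
    edit_draw_py draw before after before_line = edit_draw_py_alt draw before after before_line := by
  simp only [edit_draw_py, edit_draw_py_alt]
  rw [PySem.List.foldl_append_singleton_eq_map]
  simp only [PySem.Str.join, PySem.Str.replace, String.toList_ofList, List.map_append,
    List.map_map, List.map_cons, List.map_nil, List.cons_append,
    Function.comp_def, List.nil_append]
  rw [show "\n".toList = ['\n'] from rfl]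
  have hsplit : PySem.Chars.splitOn draw.toList ['\n']
      = pvSplitNL [] draw.toList := by
    rw [PySem.Chars.splitOn, go_split draw.toList (draw.toList.length + 1) [] [] (by omega)]
    simp
  have hrep : PySem.Chars.replace draw.toList ['\n'] ('\n' :: before_line.toList)
      = pvRepNL before_line.toList draw.toList := by
    rw [PySem.Chars.replace]
    simp only [List.isEmpty_cons, Bool.false_eq_true, if_false]
    rw [go_rep before_line.toList draw.toList draw.toList.length [] (le_refl _)]
    simp
  rw [hsplit, hrep]
  congr 1
  rw [show PySem.Chars.join ['\n'] (before.toList :: ((pvSplitNL [] draw.toList).map (fun x => before_line.toList ++ x) ++ [after.toList]))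
        = before.toList ++ '\n' :: PySem.Chars.join ['\n'] ((pvSplitNL [] draw.toList).map (fun x => before_line.toList ++ x) ++ [after.toList]) from ?_]
  · rw [join_split]
    simp
  · rcases h : (pvSplitNL [] draw.toList).map (fun x => before_line.toList ++ x) ++ [after.toList] with _ | ⟨x, xs⟩
    · exact absurd h (by simp)
    · simp [PySem.Chars.join, List.intercalate, List.intersperse]

-- ===== VERDICT (by name: the statement is the Claim_ definition above) =====
theorem edit_draw_py_spec : Claim_equal_edit_draw_py := by
  intro draw before after before_line _
  unfold Spec_edit_draw_py
  exact edit_draw_eq draw before after before_line
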